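-- pv_equiv track=rewrite | github.com/steam-making/making_site | materials/utils_pdf.py | number_to_korean_amount
-- ===== SOURCE A (Python) =====
-- _HANGUL_NUMS = ['영','일','이','삼','사','오','육','칠','팔','구']
--
-- _HANGUL_UNITS_SMALL = ['','십','백','천']
--
-- _HANGUL_UNITS_LARGE = ['','만','억','조']
--
-- def number_to_korean_amount(n: int) -> str:
--     """
--     123456789 -> '일금일억이천삼백사십오만육천칠백팔십구원정'
--     0 -> '일금영원정'
--     """
--     if int(n) == 0:
--         return "일금영원정"
--     s = str(int(n))
--     groups = []
--     while s:
--         groups.append(s[-4:])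
--         s = s[:-4]
--     words = []
--     for i, grp in enumerate(groups):
--         grp = grp.zfill(4)
--         seg = []
--         for j, ch in enumerate(grp):
--             d = int(ch)
--             if d == 0:
--                 continue
--             unit_small = _HANGUL_UNITS_SMALL[3 - j]
--             # '일십','일백','일천'의 '일'은 생략
--             if d == 1 and unit_small != '':
--                 seg.append(unit_small)
--             else:
--                 seg.append(_HANGUL_NUMS[d] + unit_small)
--         if seg:
--             words.insert(0, ''.join(seg) + _HANGUL_UNITS_LARGE[i])
--     return f"일금{''.join(words)}원정"
-- ===== SOURCE B (Python) =====
-- _HANGUL_NUMS = ['영','일','이','삼','사','오','육','칠','팔','구']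
--
-- _HANGUL_UNITS_SMALL = ['','십','백','천']
--
-- _HANGUL_UNITS_LARGE = ['','만','억','조']
--
-- def number_to_korean_amount(n: int) -> str:
--     # Single left-to-right pass over the digits using position arithmetic:
--     # no group slicing, no zfill, no nested loop.
--     if int(n) == 0:
--         return "일금영원정"
--     s = str(int(n))
--     L = len(s)
--     out = []
--     group_has_digit = False
--     for i, ch in enumerate(s):
--         p = L - 1 - i
--         d = int(ch)
--         if d != 0:
--             small = _HANGUL_UNITS_SMALL[p % 4]
--             out.append(small if d == 1 and small else _HANGUL_NUMS[d] + small)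
--             group_has_digit = True
--         if p % 4 == 0:
--             if group_has_digit:
--                 out.append(_HANGUL_UNITS_LARGE[p // 4])
--             group_has_digit = False
--     return f"일금{''.join(out)}원정"
-- ===== Notes on version B (the rewrite author's own statement) =====
-- stated objective: alternative
-- what changed: A slices the digit string into four-character groups right-to-left, zfills each group and runs a nested loop with insert(0); B makes a single left-to-right pass over the digits, deriving each digit's small and large unit from its position (remainder and quotient by four) and emitting output in order with a per-group flag.
import Mathlib
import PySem

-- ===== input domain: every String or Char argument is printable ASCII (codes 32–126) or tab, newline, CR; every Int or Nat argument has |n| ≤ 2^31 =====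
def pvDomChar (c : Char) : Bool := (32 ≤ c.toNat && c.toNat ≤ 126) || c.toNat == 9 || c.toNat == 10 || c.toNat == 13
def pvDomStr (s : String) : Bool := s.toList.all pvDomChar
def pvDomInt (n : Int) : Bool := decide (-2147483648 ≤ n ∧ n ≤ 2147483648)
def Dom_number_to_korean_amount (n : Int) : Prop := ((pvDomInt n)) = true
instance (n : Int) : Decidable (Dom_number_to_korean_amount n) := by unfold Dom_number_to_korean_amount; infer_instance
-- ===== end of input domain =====

-- B replaces A's right-to-left group slicing + zfill + nested loops by a single
-- left-to-right pass over the digit string using position arithmetic (objective: alternative).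

-- shared module constants
def numsU : List String := ["영","일","이","삼","사","오","육","칠","팔","구"]
def smallU : List String := ["","십","백","천"]
def largeU : List String := ["","만","억","조"]

-- int(ch): exact for digit characters, the only ones str(int(n)) yields under Pre_
def dgA (c : Char) : Nat := c.toNat - 48

-- ===== PORT A =====

-- while s: groups.append(s[-4:]); s = s[:-4]
def aGroups (s : List Char) : List (List Char) :=
  if h : s = [] then []
  else PySem.List.slice s (some (-4)) none :: aGroups (PySem.List.slice s none (some (-4)))
termination_by s.length
decreasing_by
  rw [PySem.List.slice_to_neg_ofNat s 4 (by omega)]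
  have : s.length ≠ 0 := fun hl => h (List.eq_nil_of_length_eq_zero hl)
  simp [List.length_take]; omega

-- body of: for j, ch in enumerate(grp): …
def aInner (seg : List String) (jc : Int × Char) : List String :=
  let d := dgA jc.2
  if d = 0 then seg
  else
    let u := smallU.getD (3 - jc.1).toNat ""
    if d = 1 ∧ u ≠ "" then seg ++ [u]
    else seg ++ [numsU.getD d "" ++ u]

def aSeg (grp : List Char) : List String :=
  (PySem.List.enumerate grp 0).foldl aInner []

-- body of: for i, grp in enumerate(groups): … words.insert(0, …)
def aOuter (words : List String) (ig : Int × List Char) : List String :=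
  let seg := aSeg (PySem.Chars.zfill ig.2 4)
  if seg ≠ [] then (PySem.Str.join "" seg ++ largeU.getD ig.1.toNat "") :: words
  else words

def aWords (groups : List (List Char)) : List String :=
  (PySem.List.enumerate groups 0).foldl aOuter []

def number_to_korean_amount (n : Int) : String :=
  if n = 0 then "일금영원정"
  else "일금" ++ PySem.Str.join "" (aWords (aGroups (PySem.Int.toChars n))) ++ "원정"

-- ===== PORT B =====

-- one step of B's single pass; state = (out, group_has_digit)
def bStep (L : Nat) (st : List String × Bool) (ic : Int × Char) : List String × Bool :=
  let p := (L : Int) - 1 - ic.1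
  let d := dgA ic.2
  let st2 :=
    if d ≠ 0 then
      let small := smallU.getD (PySem.Int.mod p 4).toNat ""
      (st.1 ++ [if d = 1 ∧ small ≠ "" then small else numsU.getD d "" ++ small], true)
    else st
  if PySem.Int.mod p 4 = 0 then
    (if st2.2 then st2.1 ++ [largeU.getD (PySem.Int.floordiv p 4).toNat ""] else st2.1, false)
  else st2

def number_to_korean_amount_alt (n : Int) : String :=
  if n = 0 then "일금영원정"
  else
    let s := PySem.Int.toChars n
    let st := (PySem.List.enumerate s 0).foldl (bStep s.length) ([], false)
    "일금" ++ PySem.Str.join "" st.1 ++ "원정"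

-- ===== PRECONDITION & SPEC =====

-- Pre_ excludes exactly the negative n, on which the Python A raises ValueError
-- (int('-') inside the digit loop); B raises the same way there.
def Pre_number_to_korean_amount (n : Int) : Prop := 0 ≤ n
instance (n : Int) : Decidable (Pre_number_to_korean_amount n) := by
  unfold Pre_number_to_korean_amount; infer_instance

def pvWitness_number_to_korean_amount : Int := 120034

def Spec_number_to_korean_amount (n : Int) (out : String) : Prop :=
  out = number_to_korean_amount_alt n
instance (n : Int) (out : String) : Decidable (Spec_number_to_korean_amount n out) := by
  unfold Spec_number_to_korean_amount; infer_instance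

-- ===== CLAIM =====

def Claim_equal_number_to_korean_amount : Prop :=
  ∀ (n : Int), Dom_number_to_korean_amount n → Pre_number_to_korean_amount n →
    Spec_number_to_korean_amount n (number_to_korean_amount n)

-- ===== LEMMAS AND PROOFS =====

-- spec-level rendering: one digit at small-unit position q
def rD (q : Nat) (c : Char) : List String :=
  let d := dgA c
  if d = 0 then []
  else
    let u := smallU.getD q ""
    if d = 1 ∧ u ≠ "" then [u] else [numsU.getD d "" ++ u]

-- rendering of one (unpadded) group; head position = tail length
def rG : List Char → List String
  | [] => []
  | c :: t => rD t.length c ++ rG t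

-- a group's word pieces at large-unit index k
def rW (g : List Char) (k : Nat) : List String :=
  if rG g = [] then [] else rG g ++ [largeU.getD k ""]

-- word pieces of k full (4-digit) groups, high to low
def lowW : Nat → List Char → List String
  | 0, _ => []
  | k+1, v => rW (v.take 4) k ++ lowW k (v.drop 4)

-- flatten a list of strings to their characters
def phi (l : List String) : List Char := (l.map String.toList).flatten

lemma phi_append (a b : List String) : phi (a ++ b) = phi a ++ phi b := by
  simp [phi]

lemma join_nil_sep : ∀ (l : List (List Char)), PySem.Chars.join [] l = l.flatten
  | [] => PySem.Chars.join_nil []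
  | [a] => by simp [PySem.Chars.join_singleton]
  | a :: b :: t => by
      rw [PySem.Chars.join_cons_cons]
      simp [join_nil_sep (b :: t)]

lemma phi_join (l : List String) : (PySem.Str.join "" l).toList = phi l := by
  rw [PySem.Str.toList_join]
  show PySem.Chars.join [] _ = _
  rw [join_nil_sep]; rfl

-- Python % and // by 4 on a natural number
lemma pymod4 (m : Nat) : PySem.Int.mod (m : Int) 4 = ((m % 4 : Nat) : Int) := by
  show (m:ℤ).fmod 4 = _
  rw [Int.fmod_eq_emod]; push_cast; simp

lemma pydiv4 (m : Nat) : PySem.Int.floordiv (m : Int) 4 = ((m / 4 : Nat) : Int) := by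
  show (m:ℤ).fdiv 4 = _
  rw [Int.fdiv_eq_ediv]; push_cast; simp

-- str(n) facts for nonnegative n
lemma toChars_nonneg (n : Int) (h : 0 ≤ n) :
    PySem.Int.toChars n = Nat.toDigits 10 n.toNat := by
  simp [PySem.Int.toChars, Int.not_lt.mpr h]

lemma toDigitsCore_head (f : Nat) : ∀ (n : Nat) (acc : List Char),
    (∃ d, d < 10 ∧ ∃ r, acc = Nat.digitChar d :: r) →
    ∃ d, d < 10 ∧ ∃ r, Nat.toDigitsCore 10 f n acc = Nat.digitChar d :: r := by
  induction f with
  | zero => intro n acc h; simpa [Nat.toDigitsCore] using h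
  | succ f ih =>
    intro n acc h
    rw [Nat.toDigitsCore]
    by_cases h0 : n / 10 = 0
    · simp only [h0, if_true]
      exact ⟨n % 10, Nat.mod_lt _ (by omega), acc, rfl⟩
    · simp only [h0, if_false]
      exact ih _ _ ⟨n % 10, Nat.mod_lt _ (by omega), acc, rfl⟩

lemma toDigits_head (m : Nat) :
    ∃ d, d < 10 ∧ ∃ r, Nat.toDigits 10 m = Nat.digitChar d :: r := by
  rw [Nat.toDigits, Nat.toDigitsCore]
  by_cases h0 : m / 10 = 0
  · simp only [h0, if_true]
    exact ⟨m % 10, Nat.mod_lt _ (by omega), [], rfl⟩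
  · simp only [h0, if_false]
    exact toDigitsCore_head _ _ _ ⟨m % 10, Nat.mod_lt _ (by omega), [], rfl⟩

lemma digitChar_not_sign (d : Nat) (h : d < 10) :
    Nat.digitChar d ≠ '+' ∧ Nat.digitChar d ≠ '-' := by
  interval_cases d <;> decide

-- aGroups on short lists, and its decomposition by a trailing 4k-block
lemma aGroups_small (u : List Char) (h1 : u ≠ []) (h4 : u.length ≤ 4) :
    aGroups u = [u] := by
  rw [aGroups, dif_neg h1]
  rw [PySem.List.slice_from_neg_ofNat u 4 (by omega),
      PySem.List.slice_to_neg_ofNat u 4 (by omega)]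
  have h0 : u.length - 4 = 0 := by omega
  rw [h0]
  simp [aGroups]

lemma aGroups_append : ∀ (k : Nat) (v u : List Char), v.length = 4 * k →
    u ≠ [] → u.length ≤ 4 → aGroups (u ++ v) = aGroups v ++ [u] := by
  intro k
  induction k with
  | zero =>
    intro v u hv h1 h4
    have : v = [] := List.eq_nil_of_length_eq_zero (by omega)
    subst this
    simp [aGroups_small u h1 h4, aGroups]
  | succ k ih =>
    intro v u hv h1 h4
    have hvne : v ≠ [] := by intro h; subst h; simp at hv
    have huv : (u ++ v) ≠ [] := by simp [hvne]
    rw [aGroups, dif_neg huv]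
    rw [PySem.List.slice_from_neg_ofNat _ 4 (by omega),
        PySem.List.slice_to_neg_ofNat _ 4 (by omega)]
    conv_rhs => rw [aGroups, dif_neg hvne]
    rw [PySem.List.slice_from_neg_ofNat _ 4 (by omega),
        PySem.List.slice_to_neg_ofNat _ 4 (by omega)]
    have hlen : (u ++ v).length = u.length + v.length := by simp
    have hd : List.drop ((u ++ v).length - 4) (u ++ v) = List.drop (v.length - 4) v := by
      rw [hlen, List.drop_append]
      have h2 : u.length + v.length - 4 - u.length = v.length - 4 := by omega
      rw [List.drop_of_length_le (by omega), h2]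
      simp
    have ht : List.take ((u ++ v).length - 4) (u ++ v) = u ++ List.take (v.length - 4) v := by
      rw [hlen, List.take_append]
      have h2 : u.length + v.length - 4 - u.length = v.length - 4 := by omega
      rw [List.take_of_length_le (by omega), h2]
    rw [hd, ht, ih (List.take (v.length - 4) v) u (by simp; omega) h1 h4]
    simp

lemma aGroups_length : ∀ (k : Nat) (v : List Char), v.length = 4 * k →
    (aGroups v).length = k := by
  intro k
  induction k with
  | zero =>
    intro v hv
    have : v = [] := List.eq_nil_of_length_eq_zero (by omega)
    subst this; simp [aGroups]
  | succ k ih =>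
    intro v hv
    have hsplit : v = v.take 4 ++ v.drop 4 := by simp
    rw [hsplit, aGroups_append k _ _ (by simp [hv]; omega)
      (by intro h; have := congrArg List.length h; simp [hv] at this) (by simp)]
    have := ih (v.drop 4) (by simp [hv]; omega)
    simp [this]

-- A's inner-loop body appends exactly one rD piece
lemma aInner_eq (seg : List String) (j : Int) (c : Char) :
    aInner seg (j, c) = seg ++ rD (3 - j).toNat c := by
  simp only [aInner, rD]
  split_ifs <;> simp

lemma rD_zero (q : Nat) : rD q '0' = [] := by simp [rD, dgA]

lemma zfill_digits (g : List Char) (h1 : g ≠ []) (h4 : g.length ≤ 4)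
    (hsign : g.length = 4 ∨ (g.head? ≠ some '+' ∧ g.head? ≠ some '-')) :
    PySem.Chars.zfill g 4 = List.replicate (4 - g.length) '0' ++ g := by
  by_cases hl : g.length = 4
  · simp [PySem.Chars.zfill, hl]
  · rcases hsign with h | ⟨hp, hm⟩
    · omega
    · match g with
      | c :: t =>
        simp at hp hm
        simp [PySem.Chars.zfill, hp, hm]
        intro hle
        omega

-- the A-side inner loop over the zfilled group renders exactly rG of the raw group
lemma aSeg_zfill (g : List Char) (h1 : g ≠ []) (h4 : g.length ≤ 4)
    (hsign : g.length = 4 ∨ (g.head? ≠ some '+' ∧ g.head? ≠ some '-')) :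
    aSeg (PySem.Chars.zfill g 4) = rG g := by
  rw [zfill_digits g h1 h4 hsign]
  match g, h1 with
  | [a], _ =>
    show aSeg ['0','0','0',a] = _
    simp only [aSeg, PySem.List.enumerate_cons, PySem.List.enumerate_nil,
      List.foldl_cons, List.foldl_nil, aInner_eq, rD_zero]
    norm_num [rG, show Int.toNat 2 = 2 from rfl, show Int.toNat 3 = 3 from rfl]
  | [a,b], _ =>
    show aSeg ['0','0',a,b] = _
    simp only [aSeg, PySem.List.enumerate_cons, PySem.List.enumerate_nil,
      List.foldl_cons, List.foldl_nil, aInner_eq, rD_zero]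
    norm_num [rG, show Int.toNat 2 = 2 from rfl, show Int.toNat 3 = 3 from rfl]
  | [a,b,c], _ =>
    show aSeg ['0',a,b,c] = _
    simp only [aSeg, PySem.List.enumerate_cons, PySem.List.enumerate_nil,
      List.foldl_cons, List.foldl_nil, aInner_eq, rD_zero]
    norm_num [rG, show Int.toNat 2 = 2 from rfl, show Int.toNat 3 = 3 from rfl]
  | [a,b,c,d], _ =>
    show aSeg [a,b,c,d] = _
    simp only [aSeg, PySem.List.enumerate_cons, PySem.List.enumerate_nil,
      List.foldl_cons, List.foldl_nil, aInner_eq]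
    norm_num [rG, show Int.toNat 2 = 2 from rfl, show Int.toNat 3 = 3 from rfl]
  | a :: b :: c :: d :: e :: t, _ => simp at h4; omega

-- A's word for one group, as a 0/1-element list
def wordOf (i : Int) (g : List Char) : List String :=
  if aSeg (PySem.Chars.zfill g 4) ≠ []
  then [PySem.Str.join "" (aSeg (PySem.Chars.zfill g 4)) ++ largeU.getD i.toNat ""]
  else []

lemma aOuter_eq (ws : List String) (i : Int) (g : List Char) :
    aOuter ws (i, g) = wordOf i g ++ ws := by
  simp only [aOuter, wordOf]
  split_ifs <;> simp

lemma aWords_eq : ∀ (gs : List (List Char)) (i0 : Int) (ws0 : List String),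
    (PySem.List.enumerate gs i0).foldl aOuter ws0
    = (((PySem.List.enumerate gs i0).map (fun ig => wordOf ig.1 ig.2)).reverse).flatten ++ ws0 := by
  intro gs
  induction gs with
  | nil => intro i0 ws0; simp [PySem.List.enumerate_nil]
  | cons g t ih =>
    intro i0 ws0
    rw [PySem.List.enumerate_cons, List.foldl_cons, aOuter_eq, ih]
    simp

lemma phi_wordOf (g : List Char) (k : Nat) (h : aSeg (PySem.Chars.zfill g 4) = rG g) :
    phi (wordOf (k : Int) g) = phi (rW g k) := by
  simp only [wordOf, rW, h]
  by_cases hg : rG g = []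
  · simp [hg]
  · simp only [hg, if_neg, ne_eq, not_false_eq_true, if_true, Int.toNat_natCast]
    simp only [phi, List.map, List.flatten, String.toList_append, phi_join]
    simp [phi, hg]

-- one step of B at small-position q of some group
lemma bStep_eq (L k q : Nat) (i : Int) (out acc : List String) (c : Char)
    (hp : (L:Int) - 1 - i = ((4*k + q : Nat) : Int)) (hq : q ≤ 3) :
    bStep L (out ++ acc, decide (acc ≠ [])) (i, c) =
      if q = 0 then
        (out ++ (if acc ++ rD 0 c = [] then []
                 else acc ++ rD 0 c ++ [largeU.getD k ""]), false)
      else (out ++ (acc ++ rD q c), decide ((acc ++ rD q c) ≠ [])) := by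
  have hmod : PySem.Int.mod ((L:Int) - 1 - i) 4 = ((q : Nat) : Int) := by
    rw [hp, pymod4]; congr 1; omega
  have hdiv : PySem.Int.floordiv ((L:Int) - 1 - i) 4 = ((k : Nat) : Int) := by
    rw [hp, pydiv4]; congr 1; omega
  simp only [bStep, hmod, hdiv, rD, Nat.cast_eq_zero, Int.toNat_natCast]
  split_ifs <;> simp_all [List.append_assoc]

-- B's pass over one whole group
lemma bGroup (L k : Nat) : ∀ (g : List Char) (i0 : Int) (out acc : List String),
    g ≠ [] → g.length ≤ 4 → (L:Int) - 1 - i0 = ((4*k + (g.length - 1) : Nat) : Int) →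
    (PySem.List.enumerate g i0).foldl (bStep L) (out ++ acc, decide (acc ≠ []))
    = (out ++ (if acc ++ rG g = [] then []
               else acc ++ rG g ++ [largeU.getD k ""]), false) := by
  intro g
  induction g with
  | nil => intro _ _ _ h; exact absurd rfl h
  | cons c t ih =>
    intro i0 out acc _ h4 hp
    rw [PySem.List.enumerate_cons, List.foldl_cons]
    match t with
    | [] =>
      simp only [List.length_cons, List.length_nil] at hp
      rw [bStep_eq L k 0 i0 out acc c (by simpa using hp) (by omega)]
      simp [rG]
    | c2 :: t2 =>
      have hq4 : (c2 :: t2).length ≤ 3 := by simp at h4 ⊢; omega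
      have hp' : (L:Int) - 1 - i0 = ((4*k + (c2::t2).length : Nat) : Int) := by
        rw [hp]
        have hl : (c :: c2 :: t2).length - 1 = (c2 :: t2).length := by simp
        rw [hl]
      rw [bStep_eq L k ((c2::t2).length) i0 out acc c hp' hq4]
      rw [if_neg (by simp : ¬((c2::t2).length = 0))]
      rw [ih (i0 + 1) out (acc ++ rD (c2 :: t2).length c) (by simp) (by simp at h4 ⊢; omega)
        (by rw [show (L:Int) - 1 - (i0+1) = ((L:Int) - 1 - i0) - 1 from by ring, hp']
            push_cast; simp; omega)]
      simp [rG, List.append_assoc]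

-- B's pass over k full groups
lemma bAll (L : Nat) : ∀ (k : Nat) (v : List Char) (i0 : Int) (out : List String),
    v.length = 4*k → (L:Int) - 1 - i0 = 4*(k:Int) - 1 →
    (PySem.List.enumerate v i0).foldl (bStep L) (out, false) = (out ++ lowW k v, false) := by
  intro k
  induction k with
  | zero =>
    intro v i0 out hv _
    have : v = [] := List.eq_nil_of_length_eq_zero (by omega)
    subst this
    simp [PySem.List.enumerate_nil, lowW]
  | succ k ih =>
    intro v i0 out hv hp
    have hsplit : v = v.take 4 ++ v.drop 4 := by simp
    rw [hsplit, PySem.List.enumerate_append, List.foldl_append]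
    have htl : (v.take 4).length = 4 := by simp; omega
    have h1 := bGroup L k (v.take 4) i0 out []
      (by rw [← List.length_pos_iff, htl]; omega)
      (by rw [htl])
      (by rw [htl, hp]; push_cast; ring)
    simp only [List.append_nil, ne_eq, not_true_eq_false, decide_false] at h1
    rw [h1]
    have h2 := ih (v.drop 4) (i0 + (v.take 4).length)
      (out ++ (if [] ++ rG (v.take 4) = [] then [] else [] ++ rG (v.take 4) ++ [largeU.getD k ""]))
      (by simp; omega)
      (by rw [htl]; push_cast; push_cast at hp; omega)
    rw [h2, ← hsplit]
    show _ = (out ++ (rW (v.take 4) k ++ lowW k (v.drop 4)), false)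
    simp [rW, List.append_assoc]

-- A's low (full) groups render the same characters as B's
lemma lowJoin : ∀ (k : Nat) (v : List Char), v.length = 4*k →
    phi ((((PySem.List.enumerate (aGroups v) 0).map (fun ig => wordOf ig.1 ig.2)).reverse).flatten)
    = phi (lowW k v) := by
  intro k
  induction k with
  | zero =>
    intro v hv
    have : v = [] := List.eq_nil_of_length_eq_zero (by omega)
    subst this
    simp [aGroups, PySem.List.enumerate_nil, lowW, phi]
  | succ k ih =>
    intro v hv
    have hsplit : v = v.take 4 ++ v.drop 4 := by simp
    have htl : (v.take 4).length = 4 := by simp; omega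
    have hga : aGroups v = aGroups (v.drop 4) ++ [v.take 4] := by
      conv_lhs => rw [hsplit]
      exact aGroups_append k _ _ (by simp [hv]; omega)
        (by rw [← List.length_pos_iff, htl]; omega) (by rw [htl])
    rw [hga, PySem.List.enumerate_append, List.map_append, List.reverse_append,
        List.flatten_append, phi_append]
    have hlen : (aGroups (v.drop 4)).length = k := aGroups_length k _ (by simp [hv]; omega)
    rw [PySem.List.enumerate_cons, PySem.List.enumerate_nil]
    simp only [List.map_cons, List.map_nil, List.reverse_cons, List.reverse_nil,
      List.nil_append, List.flatten_cons, List.flatten_nil, List.append_nil, hlen]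
    have hw := phi_wordOf (v.take 4) k
      (aSeg_zfill _ (by rw [← List.length_pos_iff, htl]; omega) (by rw [htl]) (Or.inl htl))
    rw [show ((0:Int) + (k:Int)) = (k:Int) from by ring] at *
    rw [hw, ih (v.drop 4) (by simp [hv]; omega)]
    show _ = phi (rW (v.take 4) k ++ lowW k (v.drop 4))
    rw [phi_append]

-- ===== VERDICT =====

theorem number_to_korean_amount_spec : Claim_equal_number_to_korean_amount := by
  intro n _ hpre
  unfold Spec_number_to_korean_amount
  by_cases h0 : n = 0
  · simp [number_to_korean_amount, number_to_korean_amount_alt, h0]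
  · have hpos : 0 < n := lt_of_le_of_ne hpre (Ne.symm h0)
    rw [number_to_korean_amount, number_to_korean_amount_alt, if_neg h0, if_neg h0]
    set s := PySem.Int.toChars n with hsdef
    obtain ⟨d, hd10, r, hsr⟩ : ∃ d, d < 10 ∧ ∃ r, s = Nat.digitChar d :: r := by
      rw [hsdef, toChars_nonneg n hpre]; exact toDigits_head _
    have hsne : s ≠ [] := by rw [hsr]; simp
    have hslen : 1 ≤ s.length := by rw [hsr]; simp
    set L := s.length with hL
    set k := (L - 1) / 4 with hk
    set m := (L - 1) % 4 + 1 with hm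
    have hm1 : 1 ≤ m := by omega
    have hm4 : m ≤ 4 := by omega
    have hLk : L = m + 4 * k := by omega
    set u := s.take m with hu
    set v := s.drop m with hv
    have hul : u.length = m := by rw [hu]; simp; omega
    have hvl : v.length = 4 * k := by rw [hv]; simp; omega
    have hune : u ≠ [] := by rw [← List.length_pos_iff, hul]; omega
    have huv : s = u ++ v := by rw [hu, hv]; simp
    have huhead : u.head? ≠ some '+' ∧ u.head? ≠ some '-' := by
      have : u.head? = some (Nat.digitChar d) := by
        rw [hu, hsr, hm, List.take_succ_cons]; rfl
      rw [this]
      have := digitChar_not_sign d hd10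
      exact ⟨by simpa using this.1, by simpa using this.2⟩
    -- A side
    have hA : aWords (aGroups s)
        = wordOf (k : Int) u
          ++ (((PySem.List.enumerate (aGroups v) 0).map (fun ig => wordOf ig.1 ig.2)).reverse).flatten := by
      rw [huv, aGroups_append k v u hvl hune (by omega), aWords,
          PySem.List.enumerate_append, List.foldl_append, aWords_eq, aWords_eq,
          PySem.List.enumerate_cons, PySem.List.enumerate_nil]
      simp [aGroups_length k v hvl]
    -- B side
    have hB : (PySem.List.enumerate s 0).foldl (bStep L) ([], false)
        = (rW u k ++ lowW k v, false) := by
      conv_lhs => rw [huv]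
      rw [PySem.List.enumerate_append]
      rw [List.foldl_append]
      have h1 := bGroup L k u 0 [] [] hune (by omega)
        (by push_cast; rw [hul]; push_cast; omega)
      simp only [List.append_nil, ne_eq, not_true_eq_false, decide_false, List.nil_append] at h1
      rw [h1]
      have h2 := bAll L k v ((0:Int) + u.length) (if rG u = [] then [] else rG u ++ [largeU.getD k ""])
        hvl (by rw [hul]; push_cast; omega)
      rw [h2]
      rfl
    -- reduce to character-level equality of the two joined middles
    have hmid : PySem.Str.join "" (aWords (aGroups s))
        = PySem.Str.join "" (rW u k ++ lowW k v) := by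
      apply String.toList_inj.mp
      rw [phi_join, phi_join, hA, phi_append, phi_append]
      rw [phi_wordOf u k (aSeg_zfill u hune (by omega)
        (Or.inr huhead)), lowJoin k v hvl]
    show "일금" ++ PySem.Str.join "" (aWords (aGroups s)) ++ "원정"
        = "일금" ++ PySem.Str.join ""
            ((PySem.List.enumerate s 0).foldl (bStep s.length) ([], false)).1 ++ "원정"
    rw [← hL, hB, hmid]
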